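-- pv_equiv track=rewrite | github.com/ramieeee/self_learning | my_memo/work_related/get_superset.py | path_set
-- ===== SOURCE A (Python) =====
-- def path_set(arg):
--     if arg == "/" or arg[-1] == "/":
--         raise SystemExit("   note: filename missing")
--     elif "/" in arg and len(arg) > 1:
--         idx = 0
--         for i in range(len(arg), 0, -1):
--             idx += 1
--             if arg[i-1] == "/":
--                 break
--         idx = idx * -1
--         path = arg[0:idx+1]
--     else:
--         path = "./"
--     return path
-- ===== SOURCE B (Python) =====
-- def path_set(arg):
--     if arg == "/" or arg[-1] == "/":
--         raise SystemExit("   note: filename missing")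
--     parts = arg.split("/")
--     if len(parts) > 1:
--         return "/".join(parts[:-1]) + "/"
--     return "./"
-- ===== Notes on version B (the rewrite author's own statement) =====
-- stated objective: simpler
-- what changed: Replaces the backward index-scan for the last slash (and the negative-slice arithmetic) with a forward tokenize-and-rejoin: split on '/', rejoin all components but the last, append '/'.
-- outside the precondition, e.g. on path_set(''): A raises IndexError, B raises IndexError; on path_set('/'): A raises SystemExit, B raises SystemExit
import Mathlib
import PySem

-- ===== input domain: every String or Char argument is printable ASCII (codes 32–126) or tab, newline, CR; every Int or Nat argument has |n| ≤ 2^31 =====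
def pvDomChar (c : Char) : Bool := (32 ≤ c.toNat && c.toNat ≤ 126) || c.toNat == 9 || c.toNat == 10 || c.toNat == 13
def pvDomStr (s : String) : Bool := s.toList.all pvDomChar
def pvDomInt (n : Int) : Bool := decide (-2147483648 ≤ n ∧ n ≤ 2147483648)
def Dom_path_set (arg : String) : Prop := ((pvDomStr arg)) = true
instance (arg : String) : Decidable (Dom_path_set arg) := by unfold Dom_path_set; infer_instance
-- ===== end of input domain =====

-- B replaces A's backward index-scan for the last slash with a split-on-'/' / rejoin; simpler decomposition, same cost.

-- ===== PORT A =====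
-- Python: for i in range(len(arg), 0, -1): idx += 1; if arg[i-1] == "/": break
-- ported as structural recursion on the loop counter (i here is Python's i-1)
def pathSetLoop (cs : List Char) : Nat → Int → Int
  | 0, idx => idx
  | i + 1, idx =>
      let idx := idx + 1
      if PySem.List.pyGet? cs (i : Int) = some '/' then idx else pathSetLoop cs i idx

def path_set (arg : String) : String :=
  if arg = "/" ∨ PySem.Str.pyGet? arg (-1) = some '/' then ""   -- raise SystemExit / IndexError: outside Pre_
  else if PySem.Str.isIn "/" arg = true ∧ PySem.Str.len arg > 1 then
    let idx := pathSetLoop arg.toList arg.toList.length 0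
    let idx := idx * -1
    PySem.Str.slice arg (some 0) (some (idx + 1))
  else "./"

-- ===== PORT B =====
def path_set_alt (arg : String) : String :=
  if arg = "/" ∨ PySem.Str.pyGet? arg (-1) = some '/' then ""   -- raise SystemExit / IndexError: outside Pre_
  else
    let parts := PySem.Chars.splitOn arg.toList ['/']
    if parts.length > 1 then
      String.ofList (PySem.Chars.join ['/'] (PySem.List.slice parts (some 0) (some (-1))) ++ ['/'])
    else "./"

-- ===== PRECONDITION & SPEC =====
-- Pre_ excludes exactly the inputs where A raises: "" (IndexError on arg[-1]) and strings
-- ending in "/" including "/" itself (explicit SystemExit); B raises identically there.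
def Pre_path_set (arg : String) : Prop := arg.toList ≠ [] ∧ arg.toList.getLast? ≠ some '/'
instance (arg : String) : Decidable (Pre_path_set arg) := by unfold Pre_path_set; infer_instance
def pvWitness_path_set : String := "dir/file.txt"

def Spec_path_set (arg : String) (out : String) : Prop := out = path_set_alt arg
instance (arg : String) (out : String) : Decidable (Spec_path_set arg out) := by unfold Spec_path_set; infer_instance

-- ===== CLAIM (what is proved, stated in full; the proofs are below) =====
def Claim_equal_path_set : Prop := ∀ (arg : String), Dom_path_set arg → Pre_path_set arg → Spec_path_set arg (path_set arg)

-- ===== LEMMAS AND PROOFS =====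

-- arg[-1] on a nonempty string is its last character
theorem pyGet?_neg_one (cs : List Char) (h : cs ≠ []) :
    PySem.List.pyGet? cs (-1) = cs.getLast? := by
  induction cs using List.reverseRecOn with
  | nil => simp at h
  | append_singleton ys c _ =>
      simp [PySem.List.pyGet?, PySem.List.pyIdx?]

-- '"/" in arg' is membership of the character
theorem isIn_slash_iff (cs : List Char) : PySem.Chars.isIn ['/'] cs = true ↔ '/' ∈ cs := by
  rw [PySem.Chars.isIn_iff_infix]
  constructor
  · intro h
    exact h.subset (List.mem_singleton_self '/')
  · intro h
    rcases List.append_of_mem h with ⟨s, t, rfl⟩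
    exact ⟨s, t, by simp⟩

-- last-slash decomposition of a string containing '/'
theorem exists_last_slash (cs : List Char) (h : '/' ∈ cs) :
    ∃ pre suf, cs = pre ++ '/' :: suf ∧ '/' ∉ suf := by
  induction cs using List.reverseRecOn with
  | nil => simp at h
  | append_singleton ys c ih =>
      by_cases hc : c = '/'
      · exact ⟨ys, [], by simp [hc], by simp⟩
      · have hy : '/' ∈ ys := by
          rcases List.mem_append.mp h with h1 | h1
          · exact h1
          · simp at h1; exact absurd h1.symm hc
        rcases ih hy with ⟨pre, suf, heq, hns⟩
        exact ⟨pre, suf ++ [c], by simp [heq], by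
          intro hm
          rcases List.mem_append.mp hm with h1 | h1
          · exact hns h1
          · simp at h1; exact hc h1.symm⟩

theorem pathSetLoop_skip (cs : List Char) (m : Nat) :
    ∀ n, m ≤ n → (∀ j, m ≤ j → j < n → cs[j]? ≠ some '/') →
      ∀ acc, pathSetLoop cs n acc = pathSetLoop cs m (acc + ((n : Int) - (m : Int))) := by
  intro n
  induction n with
  | zero => intro h _ acc; interval_cases m; simp
  | succ t ih =>
      intro hmn hno acc
      rcases Nat.lt_or_ge m (t+1) with hlt | hge
      · have hmt : m ≤ t := Nat.lt_succ_iff.mp hlt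
        have hne : cs[t]? ≠ some '/' := hno t hmt (Nat.lt_succ_self t)
        have : pathSetLoop cs (t+1) acc = pathSetLoop cs t (acc + 1) := by
          simp only [pathSetLoop, PySem.List.pyGet?_natCast]
          rw [if_neg hne]
        rw [this, ih hmt (fun j hj1 hj2 => hno j hj1 (Nat.lt_succ_of_lt hj2))]
        congr 1
        omega
      · have : m = t + 1 := le_antisymm hmn hge
        subst this
        congr 1
        omega

theorem pathSetLoop_hit (cs : List Char) (k : Nat) (acc : Int) (h : cs[k]? = some '/') :
    pathSetLoop cs (k+1) acc = acc + 1 := by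
  simp only [pathSetLoop, PySem.List.pyGet?_natCast]
  rw [if_pos h]

theorem modifyHead_append {α : Type} (f : List α → List α) (l t : List (List α)) (h : l ≠ []) :
    List.modifyHead f (l ++ t) = List.modifyHead f l ++ t := by
  cases l with
  | nil => exact absurd rfl h
  | cons a l' => simp

theorem clampIdx_zero (n : Nat) : PySem.List.clampIdx n 0 = 0 := by
  simp [PySem.List.clampIdx]

theorem clampIdx_neg (n : Nat) (k : Int) (hk : k < 0) (h : 0 ≤ (n : Int) + k) :
    PySem.List.clampIdx n k = ((n : Int) + k).toNat := by
  simp only [PySem.List.clampIdx]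
  rw [if_pos hk, if_neg (by omega)]

theorem modifyHead_id' {α : Type} (l : List (List α)) :
    List.modifyHead (fun x => x) l = l := by
  cases l <;> simp

-- the fuel-based PySem.Chars.splitOn.go in terms of core List.splitOn
theorem splitOn_go_spec :
    ∀ (fuel : Nat) (l cur : List Char) (acc : List (List Char)), l.length < fuel →
      PySem.Chars.splitOn.go ['/'] fuel l cur acc
        = acc.reverse ++ List.modifyHead (cur.reverse ++ ·) (List.splitOn '/' l) := by
  intro fuel
  induction fuel with
  | zero => intro l cur acc h; omega
  | succ f ih =>
      intro l cur acc h
      cases l with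
      | nil =>
          rw [PySem.Chars.splitOn.go]
          · simp [List.splitOn_nil]
          · exact fun hh => absurd hh (Nat.succ_ne_zero f)
      | cons c rest =>
          rw [PySem.Chars.splitOn.go]
          by_cases hc : c = '/'
          · subst hc
            rw [if_pos (by simp [List.isPrefixOf])]
            rw [ih _ _ _ (by simpa using Nat.lt_of_succ_lt_succ h)]
            simp only [List.splitOn, List.splitOnP_cons, beq_self_eq_true, if_true,
              List.reverse_cons, List.reverse_nil, List.nil_append, List.modifyHead_cons,
              List.append_assoc, List.cons_append]
            rw [modifyHead_id']
            simp
          · rw [if_neg (by simp [List.isPrefixOf]; exact fun he => hc he.symm)]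
            rw [ih _ _ _ (by simpa using Nat.lt_of_succ_lt_succ h)]
            simp only [List.splitOn, List.splitOnP_cons, beq_iff_eq]
            rw [if_neg hc, List.modifyHead_modifyHead]
            have hfg : (fun x => (c :: cur).reverse ++ x)
                = ((fun x => cur.reverse ++ x) ∘ List.cons c) := by
              funext x; simp
            rw [hfg]

theorem charsSplitOn_eq (cs : List Char) :
    PySem.Chars.splitOn cs ['/'] = List.splitOn '/' cs := by
  rw [PySem.Chars.splitOn, splitOn_go_spec (cs.length + 1) cs [] [] (Nat.lt_succ_self _)]
  cases h : List.splitOn '/' cs with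
  | nil => simp
  | cons a l => simp

theorem splitOn_ne_nil (cs : List Char) : List.splitOn '/' cs ≠ [] := by
  simp only [List.splitOn]
  exact List.splitOnP_ne_nil _ _

theorem splitOn_no_sep (cs : List Char) (h : '/' ∉ cs) : List.splitOn '/' cs = [cs] := by
  induction cs with
  | nil => simp
  | cons a rest ih =>
      have ha : a ≠ '/' := fun he => h (by simp [he])
      have hr := ih (fun hm => h (List.mem_cons_of_mem _ hm))
      simp only [List.splitOn, List.splitOnP_cons, beq_iff_eq] at *
      rw [if_neg ha, hr]
      simp

theorem splitOn_last (pre suf : List Char) (h : '/' ∉ suf) :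
    List.splitOn '/' (pre ++ '/' :: suf) = List.splitOn '/' pre ++ [suf] := by
  induction pre with
  | nil =>
      simp only [List.nil_append, List.splitOn, List.splitOnP_cons, beq_self_eq_true, if_true]
      rw [show List.splitOnP (fun b => b == '/') suf = List.splitOn '/' suf from rfl,
        splitOn_no_sep suf h]
      simp
  | cons a pre' ih =>
      by_cases ha : a = '/'
      · subst ha
        simp only [List.cons_append, List.splitOn, List.splitOnP_cons, beq_self_eq_true, if_true]
        rw [show ∀ l, List.splitOnP (fun b => b == '/') l = List.splitOn '/' l from fun _ => rfl,
          show ∀ l, List.splitOnP (fun b => b == '/') l = List.splitOn '/' l from fun _ => rfl, ih]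
      · simp only [List.cons_append, List.splitOn, List.splitOnP_cons, beq_iff_eq]
        rw [if_neg ha, if_neg ha]
        rw [show ∀ l, List.splitOnP (fun b => b == '/') l = List.splitOn '/' l from fun _ => rfl,
          show ∀ l, List.splitOnP (fun b => b == '/') l = List.splitOn '/' l from fun _ => rfl, ih]
        exact modifyHead_append _ _ _ (splitOn_ne_nil pre')

-- ===== VERDICT (by name: the statement is the Claim_ definition above) =====
theorem path_set_spec : Claim_equal_path_set := by
  intro arg _ hpre
  obtain ⟨hne, hlast⟩ := hpre
  unfold Spec_path_set path_set path_set_alt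
  have hguard : ¬ (arg = "/" ∨ PySem.Str.pyGet? arg (-1) = some '/') := by
    rintro (h1 | h2)
    · apply hlast; rw [h1]; decide
    · apply hlast
      rw [PySem.Str.pyGet?_eq, PySem.Chars.pyGet?, pyGet?_neg_one _ hne] at h2
      exact h2
  rw [if_neg hguard, if_neg hguard]
  by_cases hs : '/' ∈ arg.toList
  · -- there is a slash: A takes the scanning branch, B the joining branch
    obtain ⟨pre, suf, hdec, hnosuf⟩ := exists_last_slash arg.toList hs
    have hsufne : suf ≠ [] := by
      rintro rfl
      apply hlast
      rw [hdec]
      simp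
    have hlen : arg.toList.length = pre.length + 1 + suf.length := by
      rw [hdec]; simp; omega
    have hcond : PySem.Str.isIn "/" arg = true ∧ PySem.Str.len arg > 1 := by
      constructor
      · show PySem.Chars.isIn _ _ = true
        exact (isIn_slash_iff _).mpr hs
      · show (1 : Int) < (arg.toList.length : Int)
        have := List.length_pos_iff.mpr hsufne
        omega
    rw [if_pos hcond]
    -- evaluate A's loop: it counts back to the last slash
    have hloop : pathSetLoop arg.toList arg.toList.length 0 = (suf.length : Int) + 1 := by
      have hskip := pathSetLoop_skip arg.toList (pre.length + 1) arg.toList.length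
        (by omega)
        (by
          intro j hj1 hj2 hget
          apply hnosuf
          rw [hdec, List.getElem?_append_right (by omega)] at hget
          have hj' : j - pre.length = (j - pre.length - 1) + 1 := by omega
          rw [hj', List.getElem?_cons_succ] at hget
          have := List.mem_of_getElem? hget
          simpa using this) 0
      have hhit : arg.toList[pre.length]? = some '/' := by
        rw [hdec, List.getElem?_append_right (le_refl _)]
        simp
      rw [hskip, pathSetLoop_hit _ pre.length _ hhit]
      push_cast [hlen]
      ring
    rw [hloop]
    -- evaluate B's split
    have hparts : PySem.Chars.splitOn arg.toList ['/'] = List.splitOn '/' pre ++ [suf] := by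
      rw [charsSplitOn_eq, hdec, splitOn_last _ _ hnosuf]
    rw [hparts]
    have hLpos : 0 < (List.splitOn '/' pre).length :=
      List.length_pos_iff.mpr (splitOn_ne_nil pre)
    have hBcond : (List.splitOn '/' pre ++ [suf]).length > 1 := by simpa using hLpos
    rw [if_pos hBcond]
    -- both sides are pre ++ "/"
    apply String.toList_inj.mp
    rw [PySem.Str.toList_slice, String.toList_ofList]
    show PySem.List.slice arg.toList (some 0) (some (((suf.length : Int) + 1) * (-1) + 1)) = _
    have hslice : PySem.List.slice arg.toList (some 0)
        (some (((suf.length : Int) + 1) * (-1) + 1)) = pre ++ ['/'] := by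
      have hsuf1 : 1 ≤ suf.length := List.length_pos_iff.mpr hsufne
      simp only [PySem.List.slice]
      rw [clampIdx_zero, clampIdx_neg _ _ (by omega) (by push_cast [hlen]; omega)]
      have harith : ((arg.toList.length : Int) + (((suf.length : Int) + 1) * (-1) + 1)).toNat
          = pre.length + 1 := by
        push_cast [hlen]; omega
      rw [harith]
      simp only [List.drop_zero, Nat.sub_zero]
      rw [hdec, List.take_append, List.take_of_length_le (by omega),
        show pre.length + 1 - pre.length = 1 from by omega]
      simp
    rw [hslice]
    have hjoin : PySem.Chars.join ['/']
        (PySem.List.slice (List.splitOn '/' pre ++ [suf]) (some 0) (some (-1)))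
          = pre := by
      have hsl : PySem.List.slice (List.splitOn '/' pre ++ [suf]) (some 0) (some (-1))
          = List.splitOn '/' pre := by
        simp only [PySem.List.slice]
        rw [clampIdx_zero, clampIdx_neg _ _ (by omega) (by simp)]
        have harith2 : (((List.splitOn '/' pre ++ [suf]).length : Int) + (-1)).toNat
            = (List.splitOn '/' pre).length := by
          simp
        rw [harith2]
        simp only [List.drop_zero, Nat.sub_zero]
        rw [List.take_append, List.take_of_length_le (le_refl _)]
        simp
      rw [hsl, PySem.Chars.join]
      exact List.intercalate_splitOn pre '/'
    rw [hjoin]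
  · -- no slash: both return "./"
    have hA : ¬ (PySem.Str.isIn "/" arg = true ∧ PySem.Str.len arg > 1) := by
      rintro ⟨h1, _⟩
      exact hs ((isIn_slash_iff _).mp h1)
    rw [if_neg hA]
    have hB : PySem.Chars.splitOn arg.toList ['/'] = [arg.toList] := by
      rw [charsSplitOn_eq, splitOn_no_sep _ hs]
    rw [hB]
    simp
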